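-- pv_equiv track=rewrite | github.com/skvcool-rgb/KOS-Organism | kos/grid_primitives.py | count_to_color_grid
-- ===== SOURCE A (Python) =====
-- from typing import Any, Callable, Dict, List, Tuple
--
-- Grid = List[List[int]]
--
-- def count_to_color_grid(g: Grid) -> Grid:
--     """Replace each cell with the count of same-colored neighbors (0-4)."""
--     if not g or not g[0]: return g
--     r, c = len(g), len(g[0])
--     out = [[0]*c for _ in range(r)]
--     for i in range(r):
--         for j in range(c):
--             cnt = 0
--             for di, dj in [(-1,0),(1,0),(0,-1),(0,1)]:
--                 ni, nj = i+di, j+dj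
--                 if 0 <= ni < r and 0 <= nj < c and g[ni][nj] == g[i][j]:
--                     cnt += 1
--             out[i][j] = cnt
--     return out
-- ===== SOURCE B (Python) =====
-- def count_to_color_grid(g):
--     """Replace each cell with the count of same-colored neighbors (0-4)."""
--     if not g or not g[0]: return g
--     r, c = len(g), len(g[0])
--     cnt = {}
--     # each same-colored horizontal edge contributes 1 to both endpoints
--     for i in range(r):
--         row = g[i]
--         for j in range(c - 1):
--             if row[j] == row[j + 1]:
--                 cnt[(i, j)] = cnt.get((i, j), 0) + 1
--                 cnt[(i, j + 1)] = cnt.get((i, j + 1), 0) + 1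
--     # each same-colored vertical edge contributes 1 to both endpoints
--     for i in range(r - 1):
--         for j in range(c):
--             if g[i][j] == g[i + 1][j]:
--                 cnt[(i, j)] = cnt.get((i, j), 0) + 1
--                 cnt[(i + 1, j)] = cnt.get((i + 1, j), 0) + 1
--     return [[cnt.get((i, j), 0) for j in range(c)] for i in range(r)]
-- ===== Notes on version B (the rewrite author's own statement) =====
-- stated objective: alternative
-- what changed: Replaces A's per-cell scan over four neighbor offsets (with boundary checks per offset) by two edge passes that tally both endpoints of every same-colored horizontal/vertical adjacent pair into a counter dict, then reads the counts back.
import Mathlib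
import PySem

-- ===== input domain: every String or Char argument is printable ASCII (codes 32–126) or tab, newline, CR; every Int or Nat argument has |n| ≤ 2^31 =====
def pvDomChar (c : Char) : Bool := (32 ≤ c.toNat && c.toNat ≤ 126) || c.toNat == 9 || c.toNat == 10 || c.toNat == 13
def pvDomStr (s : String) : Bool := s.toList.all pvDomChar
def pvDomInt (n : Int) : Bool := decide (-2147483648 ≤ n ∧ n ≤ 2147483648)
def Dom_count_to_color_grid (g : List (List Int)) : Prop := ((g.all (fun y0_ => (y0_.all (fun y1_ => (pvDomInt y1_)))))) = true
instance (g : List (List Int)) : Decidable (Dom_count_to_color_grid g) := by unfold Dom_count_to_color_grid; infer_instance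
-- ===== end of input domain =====

-- B replaces A's per-cell scan over four neighbor offsets by two passes over same-colored
-- adjacent pairs (horizontal/vertical edges) that tally both endpoints into a counter dict;
-- objective: alternative (a timing run measured B faster by a constant factor).

-- ===== PORT A =====
-- inner 'for di, dj in [...]' loop of A, computing cnt for cell (i, j)
def cntA (g : List (List Int)) (r c : Nat) (i j : Nat) : Int :=
  ([((-1 : Int), (0 : Int)), (1, 0), (0, -1), (0, 1)]).foldl
    (fun cnt d =>
      let ni : Int := (i : Int) + d.1
      let nj : Int := (j : Int) + d.2
      if 0 ≤ ni ∧ ni < (r : Int) ∧ 0 ≤ nj ∧ nj < (c : Int) ∧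
          ((g.getD ni.toNat []).getD nj.toNat 0 = (g.getD i []).getD j 0)
      then cnt + 1 else cnt) 0

def count_to_color_grid (g : List (List Int)) : List (List Int) :=
  if g.length = 0 ∨ (g.headD []).length = 0 then g else
    let r := g.length
    let c := (g.headD []).length
    (List.range r).map (fun i => (List.range c).map (fun j => cntA g r c i j))

-- ===== PORT B =====
def count_to_color_grid_alt (g : List (List Int)) : List (List Int) :=
  if g.length = 0 ∨ (g.headD []).length = 0 then g else
    let r := g.length
    let c := (g.headD []).length
    let d1 := (List.range r).foldl (fun d i =>
        let row := g.getD i []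
        (List.range (c - 1)).foldl (fun d j =>
          if row.getD j 0 = row.getD (j + 1) 0
          then PySem.Dict.modify (PySem.Dict.modify d (i, j) 0 (· + 1)) (i, j + 1) 0 (· + 1)
          else d) d)
      (PySem.Dict.empty : PySem.Dict (Nat × Nat) Int)
    let d2 := (List.range (r - 1)).foldl (fun d i =>
        (List.range c).foldl (fun d j =>
          if (g.getD i []).getD j 0 = (g.getD (i + 1) []).getD j 0
          then PySem.Dict.modify (PySem.Dict.modify d (i, j) 0 (· + 1)) (i + 1, j) 0 (· + 1)
          else d) d) d1
    (List.range r).map (fun i => (List.range c).map (fun j => d2.getD (i, j) 0))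

-- ===== PRECONDITION & SPEC =====
-- Pre_ excludes exactly the ragged grids on which Python A raises IndexError:
-- rows shorter than the first row are read at indices up to len(g[0]) - 1.
def Pre_count_to_color_grid (g : List (List Int)) : Prop :=
  ∀ row ∈ g, (g.headD []).length ≤ row.length
instance (g : List (List Int)) : Decidable (Pre_count_to_color_grid g) := by
  unfold Pre_count_to_color_grid; infer_instance

def pvWitness_count_to_color_grid : List (List Int) := [[1, 1], [1, 2]]

def Spec_count_to_color_grid (g : List (List Int)) (out : List (List Int)) : Prop := out = count_to_color_grid_alt g
instance (g : List (List Int)) (out : List (List Int)) : Decidable (Spec_count_to_color_grid g out) := by unfold Spec_count_to_color_grid; infer_instance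

-- ===== CLAIM (what is proved, stated in full; the proofs are below) =====
def Claim_equal_count_to_color_grid : Prop := ∀ (g : List (List Int)), Dom_count_to_color_grid g → Pre_count_to_color_grid g → Spec_count_to_color_grid g (count_to_color_grid g)

-- ===== LEMMAS AND PROOFS =====

-- the two endpoints contributed by a same-colored horizontal / vertical edge
def eH (g : List (List Int)) (i j : Nat) : List (Nat × Nat) :=
  if (g.getD i []).getD j 0 = (g.getD i []).getD (j + 1) 0 then [(i, j), (i, j + 1)] else []

def eV (g : List (List Int)) (i j : Nat) : List (Nat × Nat) :=
  if (g.getD i []).getD j 0 = (g.getD (i + 1) []).getD j 0 then [(i, j), (i + 1, j)] else []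

def PH (g : List (List Int)) (r c : Nat) : List (Nat × Nat) :=
  (List.range r).flatMap (fun i => (List.range (c - 1)).flatMap (eH g i))

def PV (g : List (List Int)) (r c : Nat) : List (Nat × Nat) :=
  (List.range (r - 1)).flatMap (fun i => (List.range c).flatMap (eV g i))

theorem foldl_flatMap_bump {α κ : Type} [BEq κ] (L : List α) (E : α → List κ)
    (d : PySem.Dict κ Int) :
    L.foldl (fun d a => (E a).foldl (fun d x => PySem.Dict.modify d x 0 (· + 1)) d) d
      = (L.flatMap E).foldl (fun d x => PySem.Dict.modify d x 0 (· + 1)) d := by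
  induction L generalizing d with
  | nil => rfl
  | cons a L ih => simp only [List.foldl_cons, List.flatMap_cons, List.foldl_append]; exact ih _

theorem foldl_eH (g : List (List Int)) (i : Nat) (L : List Nat)
    (d : PySem.Dict (Nat × Nat) Int) :
    L.foldl (fun d j =>
        if (g.getD i []).getD j 0 = (g.getD i []).getD (j + 1) 0
        then PySem.Dict.modify (PySem.Dict.modify d (i, j) 0 (· + 1)) (i, j + 1) 0 (· + 1)
        else d) d
      = (L.flatMap (eH g i)).foldl (fun d x => PySem.Dict.modify d x 0 (· + 1)) d := by
  induction L generalizing d with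
  | nil => rfl
  | cons a L ih =>
    simp only [List.foldl_cons, List.flatMap_cons, List.foldl_append, eH]
    split <;> exact ih _

theorem foldl_eV (g : List (List Int)) (i : Nat) (L : List Nat)
    (d : PySem.Dict (Nat × Nat) Int) :
    L.foldl (fun d j =>
        if (g.getD i []).getD j 0 = (g.getD (i + 1) []).getD j 0
        then PySem.Dict.modify (PySem.Dict.modify d (i, j) 0 (· + 1)) (i + 1, j) 0 (· + 1)
        else d) d
      = (L.flatMap (eV g i)).foldl (fun d x => PySem.Dict.modify d x 0 (· + 1)) d := by
  induction L generalizing d with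
  | nil => rfl
  | cons a L ih =>
    simp only [List.foldl_cons, List.flatMap_cons, List.foldl_append, eV]
    split <;> exact ih _

theorem count_flatMap {α κ : Type} [BEq κ] (L : List α) (E : α → List κ) (x : κ) :
    (L.flatMap E).count x = (L.map (fun a => (E a).count x)).sum := by
  induction L with
  | nil => rfl
  | cons a L ih => simp [List.count_append, ih]

theorem sum_map_range (n : Nat) (f : Nat → Nat) :
    ((List.range n).map f).sum = ∑ b ∈ Finset.range n, f b := by
  induction n with
  | zero => rfl
  | succ n ih => simp [List.range_succ, Finset.sum_range_succ, ih]

theorem count_eH (g : List (List Int)) (a b i j : Nat) :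
    (eH g a b).count (i, j) =
      (if a = i ∧ b = j ∧ (g.getD a []).getD b 0 = (g.getD a []).getD (b + 1) 0 then 1 else 0)
      + (if a = i ∧ b + 1 = j ∧ (g.getD a []).getD b 0 = (g.getD a []).getD (b + 1) 0 then 1 else 0) := by
  unfold eH
  split <;> rename_i h
  · simp only [List.count_cons, List.count_nil, h, and_true, Prod.mk.injEq, beq_iff_eq]
    split_ifs <;> simp_all
  · simp only [List.count_nil, h, and_false, if_false]

theorem count_eV (g : List (List Int)) (a b i j : Nat) :
    (eV g a b).count (i, j) =
      (if a = i ∧ b = j ∧ (g.getD a []).getD b 0 = (g.getD (a + 1) []).getD b 0 then 1 else 0)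
      + (if a + 1 = i ∧ b = j ∧ (g.getD a []).getD b 0 = (g.getD (a + 1) []).getD b 0 then 1 else 0) := by
  unfold eV
  split <;> rename_i h
  · simp only [List.count_cons, List.count_nil, h, and_true, Prod.mk.injEq, beq_iff_eq]
    split_ifs <;> simp_all
  · simp only [List.count_nil, h, and_false, if_false]

theorem sum_ite_and_eq (n j : Nat) (P : Nat → Prop) [DecidablePred P] :
    (∑ b ∈ Finset.range n, if b = j ∧ P b then 1 else 0) = if j < n ∧ P j then 1 else 0 := by
  rw [Finset.sum_congr rfl (fun b _ => by rw [ite_and])]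
  rw [Finset.sum_ite_eq' (Finset.range n) j (fun b => if P b then 1 else 0)]
  simp [Finset.mem_range]
  split_ifs <;> simp_all

theorem sum_ite_succ_eq (n j : Nat) (P : Nat → Prop) [DecidablePred P] :
    (∑ b ∈ Finset.range n, if b + 1 = j ∧ P b then 1 else 0) = if 1 ≤ j ∧ j - 1 < n ∧ P (j - 1) then 1 else 0 := by
  cases j with
  | zero => simp
  | succ k =>
    have : ∀ b, (b + 1 = k + 1 ∧ P b) ↔ (b = k ∧ P b) := by intro b; constructor <;> rintro ⟨h1, h2⟩ <;> exact ⟨by omega, h2⟩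
    rw [Finset.sum_congr rfl (fun b _ => by rw [if_congr (this b) rfl rfl])]
    rw [sum_ite_and_eq]
    simp

theorem count_PH (g : List (List Int)) (r c i j : Nat) (hi : i < r) (hj : j < c) :
    (PH g r c).count (i, j) =
      (if j + 1 < c ∧ (g.getD i []).getD j 0 = (g.getD i []).getD (j + 1) 0 then 1 else 0)
      + (if 1 ≤ j ∧ (g.getD i []).getD (j - 1) 0 = (g.getD i []).getD j 0 then 1 else 0) := by
  unfold PH
  rw [count_flatMap, sum_map_range]
  have hinner : ∀ a, ((List.range (c - 1)).flatMap (eH g a)).count (i, j)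
      = ∑ b ∈ Finset.range (c - 1), (eH g a b).count (i, j) := fun a => by
    rw [count_flatMap, sum_map_range]
  rw [Finset.sum_congr rfl (fun a _ => hinner a)]
  rw [Finset.sum_eq_single i
    (fun a _ ha => by simp [count_eH, ha])
    (fun h => absurd (Finset.mem_range.mpr hi) h)]
  rw [Finset.sum_congr rfl (fun b _ => count_eH g i b i j)]
  rw [Finset.sum_add_distrib]
  simp only [true_and]
  rw [sum_ite_and_eq (c - 1) j (fun b => (g.getD i []).getD b 0 = (g.getD i []).getD (b + 1) 0)]
  rw [sum_ite_succ_eq (c - 1) j (fun b => (g.getD i []).getD b 0 = (g.getD i []).getD (b + 1) 0)]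
  have e1 : (j < c - 1 ∧ (g.getD i []).getD j 0 = (g.getD i []).getD (j + 1) 0)
      ↔ (j + 1 < c ∧ (g.getD i []).getD j 0 = (g.getD i []).getD (j + 1) 0) := by
    constructor <;> rintro ⟨h1, h2⟩ <;> exact ⟨by omega, h2⟩
  have e2 : (1 ≤ j ∧ j - 1 < c - 1 ∧ (g.getD i []).getD (j - 1) 0 = (g.getD i []).getD (j - 1 + 1) 0)
      ↔ (1 ≤ j ∧ (g.getD i []).getD (j - 1) 0 = (g.getD i []).getD j 0) := by
    constructor
    · rintro ⟨h1, h2, h3⟩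
      refine ⟨h1, ?_⟩
      rwa [show j - 1 + 1 = j by omega] at h3
    · rintro ⟨h1, h3⟩
      exact ⟨h1, by omega, by rwa [show j - 1 + 1 = j by omega]⟩
  rw [if_congr e1 rfl rfl, if_congr e2 rfl rfl]

theorem count_PV (g : List (List Int)) (r c i j : Nat) (hi : i < r) (hj : j < c) :
    (PV g r c).count (i, j) =
      (if i + 1 < r ∧ (g.getD i []).getD j 0 = (g.getD (i + 1) []).getD j 0 then 1 else 0)
      + (if 1 ≤ i ∧ (g.getD (i - 1) []).getD j 0 = (g.getD i []).getD j 0 then 1 else 0) := by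
  unfold PV
  rw [count_flatMap, sum_map_range]
  have hinner : ∀ a, ((List.range c).flatMap (eV g a)).count (i, j)
      = ∑ b ∈ Finset.range c, (eV g a b).count (i, j) := fun a => by
    rw [count_flatMap, sum_map_range]
  rw [Finset.sum_congr rfl (fun a _ => hinner a)]
  rw [Finset.sum_comm]
  rw [Finset.sum_eq_single j
    (fun b _ hb => by simp [count_eV, hb])
    (fun h => absurd (Finset.mem_range.mpr hj) h)]
  rw [Finset.sum_congr rfl (fun a _ => count_eV g a j i j)]
  rw [Finset.sum_add_distrib]
  have f1 : ∀ a, (a = i ∧ j = j ∧ (g.getD a []).getD j 0 = (g.getD (a + 1) []).getD j 0)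
      ↔ (a = i ∧ (g.getD a []).getD j 0 = (g.getD (a + 1) []).getD j 0) := by
    intro a; constructor
    · rintro ⟨h1, _, h3⟩; exact ⟨h1, h3⟩
    · rintro ⟨h1, h3⟩; exact ⟨h1, rfl, h3⟩
  have f2 : ∀ a, (a + 1 = i ∧ j = j ∧ (g.getD a []).getD j 0 = (g.getD (a + 1) []).getD j 0)
      ↔ (a + 1 = i ∧ (g.getD a []).getD j 0 = (g.getD (a + 1) []).getD j 0) := by
    intro a; constructor
    · rintro ⟨h1, _, h3⟩; exact ⟨h1, h3⟩
    · rintro ⟨h1, h3⟩; exact ⟨h1, rfl, h3⟩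
  rw [Finset.sum_congr rfl (fun a _ => if_congr (f1 a) rfl rfl),
      Finset.sum_congr rfl (fun a _ => if_congr (f2 a) rfl rfl)]
  rw [sum_ite_and_eq (r - 1) i (fun a => (g.getD a []).getD j 0 = (g.getD (a + 1) []).getD j 0)]
  rw [sum_ite_succ_eq (r - 1) i (fun a => (g.getD a []).getD j 0 = (g.getD (a + 1) []).getD j 0)]
  have e1 : (i < r - 1 ∧ (g.getD i []).getD j 0 = (g.getD (i + 1) []).getD j 0)
      ↔ (i + 1 < r ∧ (g.getD i []).getD j 0 = (g.getD (i + 1) []).getD j 0) := by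
    constructor <;> rintro ⟨h1, h2⟩ <;> exact ⟨by omega, h2⟩
  have e2 : (1 ≤ i ∧ i - 1 < r - 1 ∧ (g.getD (i - 1) []).getD j 0 = (g.getD (i - 1 + 1) []).getD j 0)
      ↔ (1 ≤ i ∧ (g.getD (i - 1) []).getD j 0 = (g.getD i []).getD j 0) := by
    constructor
    · rintro ⟨h1, h2, h3⟩
      refine ⟨h1, ?_⟩
      rwa [show i - 1 + 1 = i by omega] at h3
    · rintro ⟨h1, h3⟩
      exact ⟨h1, by omega, by rwa [show i - 1 + 1 = i by omega]⟩
  rw [if_congr e1 rfl rfl, if_congr e2 rfl rfl]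

theorem cntA_eq (g : List (List Int)) (r c i j : Nat) (hi : i < r) (hj : j < c) :
    cntA g r c i j =
      (if 1 ≤ i ∧ (g.getD (i - 1) []).getD j 0 = (g.getD i []).getD j 0 then 1 else 0)
      + (if i + 1 < r ∧ (g.getD (i + 1) []).getD j 0 = (g.getD i []).getD j 0 then 1 else 0)
      + (if 1 ≤ j ∧ (g.getD i []).getD (j - 1) 0 = (g.getD i []).getD j 0 then 1 else 0)
      + (if j + 1 < c ∧ (g.getD i []).getD (j + 1) 0 = (g.getD i []).getD j 0 then 1 else 0) := by
  have e1 : ((i : Int) + -1).toNat = i - 1 := by omega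
  have e2 : ((i : Int) + 1).toNat = i + 1 := by omega
  have e3 : ((j : Int) + -1).toNat = j - 1 := by omega
  have e4 : ((j : Int) + 1).toNat = j + 1 := by omega
  have e5 : ((i : Int) + 0).toNat = i := by omega
  have e6 : ((j : Int) + 0).toNat = j := by omega
  have c1 : ∀ X : Prop, (0 ≤ (i : Int) + -1 ∧ (i : Int) + -1 < (r : Int) ∧ 0 ≤ (j : Int) + 0 ∧ (j : Int) + 0 < (c : Int) ∧ X) ↔ (1 ≤ i ∧ X) := by
    intro X; constructor
    · rintro ⟨a, b, _, _, x⟩; exact ⟨by omega, x⟩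
    · rintro ⟨a, x⟩; exact ⟨by omega, by omega, by omega, by omega, x⟩
  have c2 : ∀ X : Prop, (0 ≤ (i : Int) + 1 ∧ (i : Int) + 1 < (r : Int) ∧ 0 ≤ (j : Int) + 0 ∧ (j : Int) + 0 < (c : Int) ∧ X) ↔ (i + 1 < r ∧ X) := by
    intro X; constructor
    · rintro ⟨a, b, _, _, x⟩; exact ⟨by omega, x⟩
    · rintro ⟨a, x⟩; exact ⟨by omega, by omega, by omega, by omega, x⟩
  have c3 : ∀ X : Prop, (0 ≤ (i : Int) + 0 ∧ (i : Int) + 0 < (r : Int) ∧ 0 ≤ (j : Int) + -1 ∧ (j : Int) + -1 < (c : Int) ∧ X) ↔ (1 ≤ j ∧ X) := by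
    intro X; constructor
    · rintro ⟨a, b, _, _, x⟩; exact ⟨by omega, x⟩
    · rintro ⟨a, x⟩; exact ⟨by omega, by omega, by omega, by omega, x⟩
  have c4 : ∀ X : Prop, (0 ≤ (i : Int) + 0 ∧ (i : Int) + 0 < (r : Int) ∧ 0 ≤ (j : Int) + 1 ∧ (j : Int) + 1 < (c : Int) ∧ X) ↔ (j + 1 < c ∧ X) := by
    intro X; constructor
    · rintro ⟨a, b, _, _, x⟩; exact ⟨by omega, x⟩
    · rintro ⟨a, x⟩; exact ⟨by omega, by omega, by omega, by omega, x⟩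
  simp only [cntA, List.foldl_cons, List.foldl_nil, e1, e2, e3, e4, e5, e6]
  rw [if_congr (c1 _) rfl rfl, if_congr (c2 _) rfl rfl, if_congr (c3 _) rfl rfl, if_congr (c4 _) rfl rfl]
  split_ifs <;> norm_num

theorem cell_eq (g : List (List Int)) (r c i j : Nat) (hi : i < r) (hj : j < c) :
    cntA g r c i j = (((PH g r c).count (i, j) + (PV g r c).count (i, j) : Nat) : Int) := by
  rw [count_PH g r c i j hi hj, count_PV g r c i j hi hj, cntA_eq g r c i j hi hj]
  push_cast [apply_ite (fun n : Nat => (n : Int))]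
  have h1 : ((g.getD i []).getD j 0 = (g.getD i []).getD (j + 1) 0)
      ↔ ((g.getD i []).getD (j + 1) 0 = (g.getD i []).getD j 0) := eq_comm
  have h2 : ((g.getD i []).getD j 0 = (g.getD (i + 1) []).getD j 0)
      ↔ ((g.getD (i + 1) []).getD j 0 = (g.getD i []).getD j 0) := eq_comm
  simp only [h1, h2]
  ring

theorem main_eq (g : List (List Int)) : count_to_color_grid g = count_to_color_grid_alt g := by
  unfold count_to_color_grid count_to_color_grid_alt
  split
  · rfl
  · rename_i hg
    show (List.range g.length).map (fun i => (List.range (g.headD []).length).map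
        (fun j => cntA g g.length (g.headD []).length i j))
      = (List.range g.length).map (fun i => (List.range (g.headD []).length).map (fun j =>
          (((List.range (g.length - 1)).foldl (fun d i =>
              (List.range (g.headD []).length).foldl (fun d j =>
                if (g.getD i []).getD j 0 = (g.getD (i + 1) []).getD j 0
                then PySem.Dict.modify (PySem.Dict.modify d (i, j) 0 (· + 1)) (i + 1, j) 0 (· + 1)
                else d) d)
            ((List.range g.length).foldl (fun d i =>
              (List.range ((g.headD []).length - 1)).foldl (fun d j =>
                if (g.getD i []).getD j 0 = (g.getD i []).getD (j + 1) 0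
                then PySem.Dict.modify (PySem.Dict.modify d (i, j) 0 (· + 1)) (i, j + 1) 0 (· + 1)
                else d) d)
              (PySem.Dict.empty : PySem.Dict (Nat × Nat) Int)))).getD (i, j) 0))
    have hd1 : (List.range g.length).foldl (fun d i =>
          (List.range ((g.headD []).length - 1)).foldl (fun d j =>
            if (g.getD i []).getD j 0 = (g.getD i []).getD (j + 1) 0
            then PySem.Dict.modify (PySem.Dict.modify d (i, j) 0 (· + 1)) (i, j + 1) 0 (· + 1)
            else d) d)
        (PySem.Dict.empty : PySem.Dict (Nat × Nat) Int)
        = (PH g g.length (g.headD []).length).foldl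
            (fun d x => PySem.Dict.modify d x 0 (· + 1)) PySem.Dict.empty := by
      rw [show (fun (d : PySem.Dict (Nat × Nat) Int) (i : Nat) =>
            (List.range ((g.headD []).length - 1)).foldl (fun d j =>
              if (g.getD i []).getD j 0 = (g.getD i []).getD (j + 1) 0
              then PySem.Dict.modify (PySem.Dict.modify d (i, j) 0 (· + 1)) (i, j + 1) 0 (· + 1)
              else d) d)
          = (fun d i => ((List.range ((g.headD []).length - 1)).flatMap (eH g i)).foldl
              (fun d x => PySem.Dict.modify d x 0 (· + 1)) d)
        from funext fun d => funext fun i => foldl_eH g i _ d]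
      exact foldl_flatMap_bump _ _ _
    have hd2 : ∀ d0 : PySem.Dict (Nat × Nat) Int,
        (List.range (g.length - 1)).foldl (fun d i =>
          (List.range (g.headD []).length).foldl (fun d j =>
            if (g.getD i []).getD j 0 = (g.getD (i + 1) []).getD j 0
            then PySem.Dict.modify (PySem.Dict.modify d (i, j) 0 (· + 1)) (i + 1, j) 0 (· + 1)
            else d) d) d0
        = (PV g g.length (g.headD []).length).foldl
            (fun d x => PySem.Dict.modify d x 0 (· + 1)) d0 := by
      intro d0
      rw [show (fun (d : PySem.Dict (Nat × Nat) Int) (i : Nat) =>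
            (List.range (g.headD []).length).foldl (fun d j =>
              if (g.getD i []).getD j 0 = (g.getD (i + 1) []).getD j 0
              then PySem.Dict.modify (PySem.Dict.modify d (i, j) 0 (· + 1)) (i + 1, j) 0 (· + 1)
              else d) d)
          = (fun d i => ((List.range (g.headD []).length).flatMap (eV g i)).foldl
              (fun d x => PySem.Dict.modify d x 0 (· + 1)) d)
        from funext fun d => funext fun i => foldl_eV g i _ d]
      exact foldl_flatMap_bump _ _ _
    rw [hd1, hd2]
    apply List.map_congr_left
    intro i hi
    apply List.map_congr_left
    intro j hj
    rw [List.mem_range] at hi hj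
    rw [PySem.Dict.getD_foldl_modify_add_one, PySem.Dict.getD_foldl_modify_add_one,
        PySem.Dict.getD_empty]
    rw [cell_eq g g.length (g.headD []).length i j hi hj]
    push_cast
    ring

-- ===== VERDICT (by name: the statement is the Claim_ definition above) =====
theorem count_to_color_grid_spec : Claim_equal_count_to_color_grid := by
  intro g _ _
  unfold Spec_count_to_color_grid
  exact main_eq g
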